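-- pv_equiv track=rewrite | github.com/logic-star-ai/swt-bench | src/auxillary_src/extract_patches.py | remove_binary_diffs
-- ===== SOURCE A (Python) =====
-- def remove_binary_diffs(diff_content):
--     binary_file_indicator = 'Binary files'
--
--     lines = diff_content.splitlines()
--
--     new_lines = []
--     curr_diff = []
--     skip_current_diff = False
--     for line in lines + ["diff --git"]:
--         if line.startswith('diff --git'):
--             if curr_diff and not skip_current_diff:
--                 new_lines.append('\n'.join(curr_diff))
--             curr_diff = []
--             skip_current_diff = False
--         if binary_file_indicator in line:
--             skip_current_diff = True
--         curr_diff.append(line)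
--
--     return '\n'.join(new_lines) + "\n"
-- ===== SOURCE B (Python) =====
-- def remove_binary_diffs(diff_content):
--     lines = diff_content.splitlines()
--     # group lines into blocks: a block starts at each 'diff --git' line; the
--     # text before the first such line is the (possibly empty) preamble block
--     blocks = []
--     rest = lines
--     while rest:
--         k = 1
--         while k < len(rest) and not rest[k].startswith('diff --git'):
--             k += 1
--         blocks.append(rest[:k])
--         rest = rest[k:]
--     # drop every block that mentions a binary file, flatten, join
--     kept = []
--     for block in blocks:
--         if not any('Binary files' in line for line in block):
--             kept.extend(block)
--     return '\n'.join(kept) + '\n'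
-- ===== Notes on version B (the rewrite author's own statement) =====
-- stated objective: alternative
-- what changed: Replaces A's single-pass state machine (running buffer, skip flag, appended sentinel header) by a group-then-filter pipeline: cut the line list into header-delimited blocks, drop every block that mentions a binary file, flatten and join once.
import Mathlib
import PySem

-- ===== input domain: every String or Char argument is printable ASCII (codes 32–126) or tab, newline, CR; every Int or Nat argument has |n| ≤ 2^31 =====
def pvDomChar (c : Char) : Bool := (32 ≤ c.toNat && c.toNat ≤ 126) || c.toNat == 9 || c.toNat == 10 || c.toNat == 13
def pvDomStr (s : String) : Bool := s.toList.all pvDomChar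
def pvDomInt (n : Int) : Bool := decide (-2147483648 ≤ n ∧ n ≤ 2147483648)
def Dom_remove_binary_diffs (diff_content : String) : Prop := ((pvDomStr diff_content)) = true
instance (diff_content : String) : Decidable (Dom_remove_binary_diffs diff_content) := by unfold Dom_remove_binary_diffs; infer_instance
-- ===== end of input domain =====

-- B groups the lines into header-delimited blocks, filters out the binary-file blocks, and joins once,
-- instead of A's single-pass state machine with a skip flag and a sentinel header (alternative decomposition, same cost).

-- ===== PORT A =====
def pvIsHeader (l : String) : Bool := PySem.Str.startswith l "diff --git"
def pvIsBinary (l : String) : Bool := PySem.Str.isIn "Binary files" l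

-- the loop body of A: flush on a 'diff --git' header, mark skip on 'Binary files', append the line
def pvStepA (st : List String × List String × Bool) (line : String) : List String × List String × Bool :=
  let st1 :=
    if pvIsHeader line then
      ((if !st.2.1.isEmpty && !st.2.2 then st.1 ++ [PySem.Str.join "\n" st.2.1] else st.1),
       ([] : List String), false)
    else st
  let st2 := if pvIsBinary line then (st1.1, st1.2.1, true) else st1
  (st2.1, st2.2.1 ++ [line], st2.2.2)

def remove_binary_diffs (diff_content : String) : String :=
  let lines := PySem.Str.splitlines diff_content
  let st := (lines ++ ["diff --git"]).foldl pvStepA (([] : List String), ([] : List String), false)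
  PySem.Str.join "\n" st.1 ++ "\n"

-- ===== PORT B =====
-- the outer while loop of B: cut the line list into blocks at each header line
def pvBlocksB : List String → List (List String)
  | [] => []
  | h :: t =>
      (h :: t.takeWhile (fun l => !pvIsHeader l)) :: pvBlocksB (t.dropWhile (fun l => !pvIsHeader l))
termination_by l => l.length
decreasing_by
  exact Nat.lt_succ_of_le (t.length_dropWhile_le _)

def pvHasBinary (block : List String) : Bool := block.any pvIsBinary

def remove_binary_diffs_alt (diff_content : String) : String :=
  let lines := PySem.Str.splitlines diff_content
  let blocks := pvBlocksB lines
  let kept := blocks.foldl (fun acc b => if !pvHasBinary b then acc ++ b else acc) ([] : List String)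
  PySem.Str.join "\n" kept ++ "\n"

-- ===== PRECONDITION & SPEC =====
def Spec_remove_binary_diffs (diff_content : String) (out : String) : Prop := out = remove_binary_diffs_alt diff_content
instance (diff_content : String) (out : String) : Decidable (Spec_remove_binary_diffs diff_content out) := by unfold Spec_remove_binary_diffs; infer_instance

-- ===== CLAIM (what is proved, stated in full; the proofs are below) =====
def Claim_equal_remove_binary_diffs : Prop := ∀ (diff_content : String), Dom_remove_binary_diffs diff_content → Spec_remove_binary_diffs diff_content (remove_binary_diffs diff_content)

-- ===== LEMMAS AND PROOFS =====

-- the new_lines list A holds after flushing the pending block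
def pvFinish (st : List String × List String × Bool) : List String :=
  if !st.2.1.isEmpty && !st.2.2 then st.1 ++ [PySem.Str.join "\n" st.2.1] else st.1

lemma pvStepA_sentinel (st : List String × List String × Bool) :
    (pvStepA st "diff --git").1 = pvFinish st := by
  have h1 : pvIsHeader "diff --git" = true := by decide
  have h2 : pvIsBinary "diff --git" = false := by decide
  simp only [pvStepA, pvFinish, h1, h2, if_true, Bool.false_eq_true, if_false]

lemma pvStepA_nonheader (nl curr : List String) (skip : Bool) (l : String)
    (h : pvIsHeader l = false) :
    pvStepA (nl, curr, skip) l = (nl, curr ++ [l], skip || pvIsBinary l) := by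
  cases hb : pvIsBinary l <;> simp [pvStepA, h, hb]

lemma pvStepA_header (nl curr : List String) (skip : Bool) (l : String)
    (h : pvIsHeader l = true) :
    pvStepA (nl, curr, skip) l =
      (pvFinish (nl, curr, skip), [l], pvIsBinary l) := by
  cases hb : pvIsBinary l <;> simp [pvStepA, pvFinish, h, hb]

lemma pvStepA_fresh (nl : List String) (l : String) :
    pvStepA (nl, [], false) l = (nl, [l], pvIsBinary l) := by
  cases hh : pvIsHeader l
  · simpa using pvStepA_nonheader nl [] false l hh
  · simpa [pvFinish] using pvStepA_header nl [] false l hh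

lemma pvRun (p : List String) (hp : ∀ l ∈ p, pvIsHeader l = false) :
    ∀ (nl curr : List String) (skip : Bool),
      p.foldl pvStepA (nl, curr, skip) =
        (nl, curr ++ p, skip || p.any pvIsBinary) := by
  induction p with
  | nil => intro nl curr skip; simp
  | cons l p ih =>
      intro nl curr skip
      have hl : pvIsHeader l = false := hp l (by simp)
      have hp' : ∀ x ∈ p, pvIsHeader x = false := fun x hx => hp x (by simp [hx])
      simp only [List.foldl_cons, pvStepA_nonheader nl curr skip l hl, ih hp']
      simp [Bool.or_assoc]

lemma pvMain : ∀ (n : Nat) (lines : List String), lines.length ≤ n → ∀ nl : List String,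
    pvFinish (lines.foldl pvStepA (nl, [], false)) =
      nl ++ ((pvBlocksB lines).filter (fun b => !pvHasBinary b)).map (PySem.Str.join "\n") := by
  intro n
  induction n with
  | zero =>
      intro lines hlen nl
      have : lines = [] := List.eq_nil_of_length_eq_zero (Nat.le_zero.mp hlen)
      subst this
      simp [pvBlocksB, pvFinish]
  | succ n ih =>
      intro lines hlen nl
      match lines with
      | [] => simp [pvBlocksB, pvFinish]
      | h :: t =>
          set p := t.takeWhile (fun l => !pvIsHeader l) with hp
          set rest := t.dropWhile (fun l => !pvIsHeader l) with hrest
          have hsplit : t = p ++ rest := (List.takeWhile_append_dropWhile).symm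
          have hpmem : ∀ l ∈ p, pvIsHeader l = false := by
            intro l hl
            have := List.mem_takeWhile_imp (hp ▸ hl)
            simpa using this
          have hblocks : pvBlocksB (h :: t) = (h :: p) :: pvBlocksB rest := by
            rw [pvBlocksB]
          have hfold1 : (h :: t).foldl pvStepA (nl, [], false) =
              rest.foldl pvStepA (nl, h :: p,
                pvIsBinary h || p.any pvIsBinary) := by
            calc (h :: t).foldl pvStepA (nl, [], false)
                = t.foldl pvStepA (nl, [h], pvIsBinary h) := by
                  simp [pvStepA_fresh]
              _ = (p ++ rest).foldl pvStepA (nl, [h], pvIsBinary h) := by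
                  rw [← hsplit]
              _ = rest.foldl pvStepA (nl, h :: p,
                    pvIsBinary h || p.any pvIsBinary) := by
                  rw [List.foldl_append, pvRun p hpmem]
                  rfl
          have hskip : pvHasBinary (h :: p) =
              (pvIsBinary h || p.any pvIsBinary) := by
            simp [pvHasBinary]
          match hr : rest with
          | [] =>
              rw [hfold1, hblocks]
              simp only [List.foldl_nil, pvBlocksB, List.filter_cons, pvFinish, ← hskip]
              cases pvHasBinary (h :: p) <;> simp
          | r :: rs =>
              have hrhead : pvIsHeader r = true := by
                have hh := List.head?_dropWhile_not (fun l => !pvIsHeader l) t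
                rw [← hrest] at hh
                simpa using hh
              have hlen' : rs.length + 1 ≤ n := by
                have h1 : (r :: rs).length ≤ t.length := by
                  rw [hrest]; exact t.length_dropWhile_le _
                have h2 : t.length + 1 ≤ n + 1 := by simpa using hlen
                simp at h1
                omega
              rw [hfold1]
              have hstep : pvStepA (nl, h :: p,
                    pvIsBinary h || p.any pvIsBinary) r =
                  pvStepA (pvFinish (nl, h :: p,
                    pvIsBinary h || p.any pvIsBinary), [], false) r := by
                rw [pvStepA_header _ _ _ _ hrhead, pvStepA_fresh]
              simp only [List.foldl_cons, hstep]
              have := ih (r :: rs) (by simpa using hlen')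
                (pvFinish (nl, h :: p,
                  pvIsBinary h || p.any pvIsBinary))
              simp only [List.foldl_cons] at this
              rw [this, hblocks]
              simp only [List.filter_cons, ← hskip, pvFinish]
              cases pvHasBinary (h :: p) <;> simp

lemma pvJoinAppend (sep : List Char) : ∀ (xs ys : List (List Char)), xs ≠ [] → ys ≠ [] →
    PySem.Chars.join sep (xs ++ ys) = PySem.Chars.join sep xs ++ sep ++ PySem.Chars.join sep ys := by
  intro xs
  induction xs with
  | nil => intro ys h; exact absurd rfl h
  | cons x xs ih =>
      intro ys _ hy
      match xs with
      | [] =>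
          match ys with
          | y :: ys' => simp [PySem.Chars.join_cons_cons, PySem.Chars.join_singleton]
      | x' :: xs' =>
          have hih : PySem.Chars.join sep (x' :: (xs' ++ ys)) =
              PySem.Chars.join sep (x' :: xs') ++ sep ++ PySem.Chars.join sep ys :=
            ih ys (by simp) hy
          calc PySem.Chars.join sep ((x :: x' :: xs') ++ ys)
              = x ++ sep ++ PySem.Chars.join sep (x' :: (xs' ++ ys)) := by
                simp [PySem.Chars.join_cons_cons]
            _ = x ++ sep ++ (PySem.Chars.join sep (x' :: xs') ++ sep ++ PySem.Chars.join sep ys) := by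
                rw [hih]
            _ = PySem.Chars.join sep (x :: x' :: xs') ++ sep ++ PySem.Chars.join sep ys := by
                simp [PySem.Chars.join_cons_cons, List.append_assoc]

lemma pvJoinMapFlatten (sep : List Char) : ∀ (bs : List (List (List Char))),
    (∀ b ∈ bs, b ≠ []) →
    PySem.Chars.join sep (bs.map (PySem.Chars.join sep)) = PySem.Chars.join sep bs.flatten := by
  intro bs
  induction bs with
  | nil => intro _; simp
  | cons b bs ih =>
      intro hne
      match bs with
      | [] => simp [PySem.Chars.join_singleton]
      | c :: r =>
          have hb : b ≠ [] := hne b (by simp)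
          have hc : c ≠ [] := hne c (by simp)
          have hflat : (c :: r).flatten ≠ [] := by
            cases c with
            | nil => exact absurd rfl hc
            | cons a as => simp
          have ih' := ih (fun x hx => hne x (by simp [hx]))
          calc PySem.Chars.join sep ((b :: c :: r).map (PySem.Chars.join sep))
              = PySem.Chars.join sep b ++ sep ++
                  PySem.Chars.join sep ((c :: r).map (PySem.Chars.join sep)) := by
                simp [PySem.Chars.join_cons_cons]
            _ = PySem.Chars.join sep b ++ sep ++ PySem.Chars.join sep (c :: r).flatten := by rw [ih']
            _ = PySem.Chars.join sep (b ++ (c :: r).flatten) := by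
                rw [pvJoinAppend sep b (c :: r).flatten hb hflat]
            _ = PySem.Chars.join sep (b :: c :: r).flatten := by simp

lemma pvBlocksB_ne_nil : ∀ (ls : List String), ∀ b ∈ pvBlocksB ls, b ≠ [] := by
  intro ls
  induction ls using pvBlocksB.induct with
  | case1 => simp [pvBlocksB]
  | case2 h t ih =>
      intro b hb
      rw [pvBlocksB] at hb
      rcases List.mem_cons.mp hb with h1 | h2
      · subst h1; simp
      · exact ih b h2

lemma pvStrJoinMapFlatten (bs : List (List String)) (hne : ∀ b ∈ bs, b ≠ []) :
    PySem.Str.join "\n" (bs.map (PySem.Str.join "\n")) = PySem.Str.join "\n" bs.flatten := by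
  apply String.toList_inj.mp
  rw [PySem.Str.toList_join, PySem.Str.toList_join]
  have h1 : (bs.map (PySem.Str.join "\n")).map String.toList =
      (bs.map (List.map String.toList)).map (PySem.Chars.join "\n".toList) := by
    simp only [List.map_map]
    exact List.map_congr_left (fun b _ => PySem.Str.toList_join "\n" b)
  have h2 : bs.flatten.map String.toList = (bs.map (List.map String.toList)).flatten := by
    simp [List.map_flatten]
  rw [h1, h2]
  exact pvJoinMapFlatten "\n".toList (bs.map (List.map String.toList))
    (fun b hb => by
      rcases List.mem_map.mp hb with ⟨c, hc, rfl⟩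
      simpa using hne c hc)

-- ===== VERDICT (by name: the statement is the Claim_ definition above) =====
theorem remove_binary_diffs_spec : Claim_equal_remove_binary_diffs := by
  intro d _
  unfold Spec_remove_binary_diffs remove_binary_diffs remove_binary_diffs_alt
  simp only []
  set lines := PySem.Str.splitlines d with hlines
  have hA : ((lines ++ ["diff --git"]).foldl pvStepA (([] : List String), ([] : List String), false)).1 =
      ((pvBlocksB lines).filter (fun b => !pvHasBinary b)).map (PySem.Str.join "\n") := by
    rw [List.foldl_append]
    simp only [List.foldl_cons, List.foldl_nil]
    rw [pvStepA_sentinel, pvMain lines.length lines (le_refl _) []]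
    simp
  have hB : (pvBlocksB lines).foldl (fun acc b => if !pvHasBinary b then acc ++ b else acc)
        ([] : List String) = ((pvBlocksB lines).filter (fun b => !pvHasBinary b)).flatten := by
    rw [PySem.List.foldl_if_eq_foldl_filter, PySem.List.foldl_append_eq_flatten]
    simp
  rw [hA, hB]
  rw [pvStrJoinMapFlatten _ (fun b hb => pvBlocksB_ne_nil lines b (List.mem_filter.mp hb).1)]
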